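-- pv_equiv track=rewrite | github.com/gswon/CS-UY-1134 | Homework/HW4/gs3842_hw4_q4.py | list_min
-- ===== SOURCE A (Python) =====
-- def list_min(lst, low, high):
--     # if low == high:
--     #     return lst[low]
--     # return min(lst[low], list_min(lst, low+1, high))
--
--     if low == high:
--         return lst[low]
--     else:
--         value = list_min(lst, low+1, high)
--         if lst[low] < value:
--             return lst[low]
--         else:
--             return value
-- ===== SOURCE B (Python) =====
-- def list_min(lst, low, high):
--     current = lst[low]
--     for i in range(low + 1, high + 1):
--         if lst[i] < current:
--             current = lst[i]
--     return current
-- ===== Notes on version B (the rewrite author's own statement) =====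
-- stated objective: idiomatic
-- what changed: Replaces the tail recursion over the segment with an explicit loop maintaining a running minimum.
import Mathlib
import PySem

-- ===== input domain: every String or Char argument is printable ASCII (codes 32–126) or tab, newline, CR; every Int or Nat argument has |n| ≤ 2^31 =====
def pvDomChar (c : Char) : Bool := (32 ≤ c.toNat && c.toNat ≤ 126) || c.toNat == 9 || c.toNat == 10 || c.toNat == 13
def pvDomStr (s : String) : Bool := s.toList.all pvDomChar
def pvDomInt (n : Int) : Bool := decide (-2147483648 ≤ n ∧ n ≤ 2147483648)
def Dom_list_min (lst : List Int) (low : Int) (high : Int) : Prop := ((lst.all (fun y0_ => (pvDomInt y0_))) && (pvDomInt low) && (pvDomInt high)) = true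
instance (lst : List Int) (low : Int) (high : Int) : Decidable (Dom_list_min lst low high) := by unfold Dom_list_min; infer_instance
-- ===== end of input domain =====

-- B rewrites A's tail recursion as an explicit loop with a running minimum (idiomatic; O(1) space).

-- ===== PORT A =====
-- A's recursion on the segment [low, high]; fuel (high - low).toNat bounds the
-- recursion depth (inside Pre_ it is exactly the depth Python uses; outside Pre_
-- Python raises, nothing is claimed).
def listMinGo (lst : List Int) (low high : Int) : Nat → Int
  | 0 => (PySem.List.pyGet? lst low).getD 0
  | n + 1 =>
    if low == high then (PySem.List.pyGet? lst low).getD 0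
    else
      let value := listMinGo lst (low + 1) high n
      if (PySem.List.pyGet? lst low).getD 0 < value then (PySem.List.pyGet? lst low).getD 0
      else value

def list_min (lst : List Int) (low : Int) (high : Int) : Int :=
  listMinGo lst low high (high - low).toNat

-- ===== PORT B =====
def list_min_alt (lst : List Int) (low : Int) (high : Int) : Int :=
  (PySem.List.pyRange (low + 1) (high + 1) 1).foldl
    (fun current i =>
      if (PySem.List.pyGet? lst i).getD 0 < current then (PySem.List.pyGet? lst i).getD 0
      else current)
    ((PySem.List.pyGet? lst low).getD 0)

-- ===== PRECONDITION & SPEC =====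
-- Exactly the inputs on which Python A returns: a nonempty segment whose indices
-- low..high are all in Python's (negative-index-allowing) range; otherwise A raises
-- IndexError or RecursionError.
def Pre_list_min (lst : List Int) (low : Int) (high : Int) : Prop :=
  low ≤ high ∧ -(lst.length : Int) ≤ low ∧ high < (lst.length : Int)
instance (lst : List Int) (low : Int) (high : Int) : Decidable (Pre_list_min lst low high) := by
  unfold Pre_list_min; infer_instance

def pvWitness_list_min : List Int × Int × Int := ([3, 1, 2], 0, 2)

def Spec_list_min (lst : List Int) (low : Int) (high : Int) (out : Int) : Prop :=
  out = list_min_alt lst low high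
instance (lst : List Int) (low : Int) (high : Int) (out : Int) : Decidable (Spec_list_min lst low high out) := by
  unfold Spec_list_min; infer_instance

-- ===== CLAIM (what is proved, stated in full; the proofs are below) =====
def Claim_equal_list_min : Prop := ∀ (lst : List Int) (low : Int) (high : Int), Dom_list_min lst low high → Pre_list_min lst low high → Spec_list_min lst low high (list_min lst low high)

-- ===== LEMMAS AND PROOFS =====

-- B's step function is `min` of the element and the accumulator.
theorem step_eq_min (lst : List Int) (current i : Int) :
    (if (PySem.List.pyGet? lst i).getD 0 < current then (PySem.List.pyGet? lst i).getD 0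
     else current) = min ((PySem.List.pyGet? lst i).getD 0) current := by
  rw [min_def]
  split <;> split <;> omega

theorem foldl_min_pull (lst : List Int) (r : List Int) (a b : Int) :
    r.foldl (fun current i => min ((PySem.List.pyGet? lst i).getD 0) current) (min a b)
      = min a (r.foldl (fun current i => min ((PySem.List.pyGet? lst i).getD 0) current) b) := by
  induction r generalizing b with
  | nil => simp
  | cons x xs ih =>
    simp only [List.foldl_cons]
    rw [min_left_comm, ih]

theorem foldl_step_eq_min (lst : List Int) (r : List Int) (b : Int) :
    r.foldl (fun current i =>
        if (PySem.List.pyGet? lst i).getD 0 < current then (PySem.List.pyGet? lst i).getD 0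
        else current) b
      = r.foldl (fun current i => min ((PySem.List.pyGet? lst i).getD 0) current) b := by
  induction r generalizing b with
  | nil => rfl
  | cons x xs ih => simp only [List.foldl_cons, step_eq_min]

theorem listMinGo_eq_alt (lst : List Int) :
    ∀ (n : Nat) (low high : Int), low ≤ high → (high - low).toNat = n →
      listMinGo lst low high n = list_min_alt lst low high := by
  intro n
  induction n with
  | zero =>
    intro low high hle hn
    have : low = high := by omega
    subst this
    simp [listMinGo, list_min_alt, PySem.List.pyRange]
  | succ n ih =>
    intro low high hle hn
    have hlt : low < high := by omega
    have hne : (low == high) = false := by simp; omega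
    have hrec := ih (low + 1) high (by omega) (by omega)
    simp only [listMinGo, hne, Bool.false_eq_true, if_false]
    rw [hrec]
    unfold list_min_alt
    rw [step_eq_min, foldl_step_eq_min, foldl_step_eq_min,
      PySem.List.pyRange_one_cons (show low + 1 < high + 1 by omega)]
    simp only [List.foldl_cons]
    rw [min_comm ((PySem.List.pyGet? lst (low + 1)).getD 0), foldl_min_pull]

-- ===== VERDICT (by name: the statement is the Claim_ definition above) =====
theorem list_min_spec : Claim_equal_list_min := by
  intro lst low high _ hpre
  unfold Spec_list_min list_min
  exact listMinGo_eq_alt lst (high - low).toNat low high hpre.1 rfl
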